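-- pv_equiv track=rewrite | github.com/madrury/puppy-interview-night-problems | solutions/list-of-tuples.py | to_lagged_filtered_list_of_tuples
-- ===== SOURCE A (Python) =====
-- def to_lagged_filtered_list_of_tuples(ts: tuple[list[int], list[int]]) -> list[tuple[int, int]]:
--     firsts, lasts = ts
--     tups = []
--     previous_is_even = False
--     for fst, lst in zip(firsts, lasts):
--         if previous_is_even:
--             tups.append((fst, lst))
--         if (fst + lst) % 2 == 0:
--             previous_is_even = True
--         else:
--             previous_is_even = False
--     return tups
-- ===== SOURCE B (Python) =====
-- def to_lagged_filtered_list_of_tuples(ts: tuple[list[int], list[int]]) -> list[tuple[int, int]]: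
--     firsts, lasts = ts
--     pairs = list(zip(firsts, lasts))
--     return [cur for prev, cur in zip(pairs, pairs[1:]) if (prev[0] + prev[1]) % 2 == 0]
-- ===== Notes on version B (the rewrite author's own statement) =====
-- stated objective: simpler
-- what changed: Replaces the stateful previous_is_even flag loop with a single comprehension over consecutive-pair windows zip(pairs, pairs[1:]), keeping a tuple when its predecessor's sum is even.
import Mathlib
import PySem

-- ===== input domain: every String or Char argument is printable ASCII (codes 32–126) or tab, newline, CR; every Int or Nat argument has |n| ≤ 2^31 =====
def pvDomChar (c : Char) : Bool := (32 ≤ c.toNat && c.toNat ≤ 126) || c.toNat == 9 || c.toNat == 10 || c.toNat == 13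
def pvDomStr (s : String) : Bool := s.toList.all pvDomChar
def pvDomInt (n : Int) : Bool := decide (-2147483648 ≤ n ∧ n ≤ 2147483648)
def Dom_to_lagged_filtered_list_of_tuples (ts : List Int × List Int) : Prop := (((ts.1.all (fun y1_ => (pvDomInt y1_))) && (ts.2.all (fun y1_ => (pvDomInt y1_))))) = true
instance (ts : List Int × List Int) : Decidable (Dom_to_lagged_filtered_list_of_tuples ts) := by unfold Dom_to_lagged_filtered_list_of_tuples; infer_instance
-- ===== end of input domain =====

-- B replaces A's previous_is_even flag loop with a comprehension over consecutive-pair windows (simpler decomposition).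

-- ===== PORT A =====
-- literal transliteration: fold over zip(firsts, lasts) carrying (tups, previous_is_even)
def to_lagged_filtered_list_of_tuples (ts : List Int × List Int) : List (Int × Int) :=
  let firsts := ts.1
  let lasts := ts.2
  let fin := (firsts.zip lasts).foldl
    (fun (st : List (Int × Int) × Bool) p =>
      let tups := if st.2 then st.1 ++ [(p.1, p.2)] else st.1
      let previous_is_even := PySem.Int.mod (p.1 + p.2) 2 == 0
      (tups, previous_is_even))
    ([], false)
  fin.1

-- ===== PORT B =====
-- literal transliteration of Source B: pairs = zip; comprehension over zip(pairs, pairs[1:])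
def to_lagged_filtered_list_of_tuples_alt (ts : List Int × List Int) : List (Int × Int) :=
  let firsts := ts.1
  let lasts := ts.2
  let pairs := firsts.zip lasts
  (pairs.zip (PySem.List.slice pairs (some 1) none)).filterMap
    (fun pc => if PySem.Int.mod (pc.1.1 + pc.1.2) 2 == 0 then some pc.2 else none)

-- ===== PRECONDITION & SPEC =====
def Spec_to_lagged_filtered_list_of_tuples (ts : List Int × List Int) (out : List (Int × Int)) : Prop := out = to_lagged_filtered_list_of_tuples_alt ts
instance (ts : List Int × List Int) (out : List (Int × Int)) : Decidable (Spec_to_lagged_filtered_list_of_tuples ts out) := by unfold Spec_to_lagged_filtered_list_of_tuples; infer_instance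

-- ===== CLAIM (what is proved, stated in full; the proofs are below) =====
def Claim_equal_to_lagged_filtered_list_of_tuples : Prop := ∀ (ts : List Int × List Int), Dom_to_lagged_filtered_list_of_tuples ts → Spec_to_lagged_filtered_list_of_tuples ts (to_lagged_filtered_list_of_tuples ts)

-- ===== LEMMAS AND PROOFS =====

-- intermediate description of the output: W e l keeps each element whose predecessor's sum was even,
-- with e the evenness of the element before l
def pvW (e : Bool) : List (Int × Int) → List (Int × Int)
  | [] => []
  | c :: rest => (if e then [c] else []) ++ pvW (PySem.Int.mod (c.1 + c.2) 2 == 0) rest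

theorem pvA_foldl (l : List (Int × Int)) (acc : List (Int × Int)) (e : Bool) :
    (l.foldl
      (fun (st : List (Int × Int) × Bool) p =>
        ((if st.2 then st.1 ++ [(p.1, p.2)] else st.1), PySem.Int.mod (p.1 + p.2) 2 == 0))
      (acc, e)).1 = acc ++ pvW e l := by
  induction l generalizing acc e with
  | nil => simp [pvW]
  | cons c rest ih =>
    simp only [List.foldl_cons, pvW, ih]
    cases e <;> simp

theorem pvB_window (a : Int × Int) (rest : List (Int × Int)) :
    ((a :: rest).zip rest).filterMap
      (fun pc => if PySem.Int.mod (pc.1.1 + pc.1.2) 2 == 0 then some pc.2 else none)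
      = pvW (PySem.Int.mod (a.1 + a.2) 2 == 0) rest := by
  induction rest generalizing a with
  | nil => simp [pvW]
  | cons c rs ih =>
    simp only [List.zip_cons_cons, List.filterMap_cons, pvW, ih c]
    by_cases h : (2:Int) ∣ (a.1 + a.2) <;> simp [h]

-- ===== VERDICT (by name: the statement is the Claim_ definition above) =====
theorem to_lagged_filtered_list_of_tuples_spec : Claim_equal_to_lagged_filtered_list_of_tuples := by
  intro ts _
  unfold Spec_to_lagged_filtered_list_of_tuples
  unfold to_lagged_filtered_list_of_tuples to_lagged_filtered_list_of_tuples_alt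
  simp only [PySem.List.slice_from_one]
  cases h : ts.1.zip ts.2 with
  | nil => simp
  | cons a rest =>
    simp only [List.foldl_cons, List.tail_cons]
    rw [show ((if false then ([] : List (Int × Int)) ++ [(a.1, a.2)] else []) = []) from rfl]
    rw [pvA_foldl, pvB_window]
    simp
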